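-- pv_equiv track=rewrite | github.com/MaDBuck/vpw | 2016/3 - Garfield.py | vindbestevis
-- ===== SOURCE A (Python) =====
-- def vindbestevis(setje, garfield, gegetenvissen, lengte, breedte):
--     min = None
--     visje = None
--     for vis in setje:
--         if vis not in gegetenvissen:
--             if min is None or afstand(vis, garfield) < min:
--                 min = afstand(vis, garfield)
--                 visje = vis
--             if min is not None and afstand(vis, garfield) == min:
--                 minafs = 0
--                 visvroeger = vindomstreken(visje, setje, gegetenvissen, minafs)
--                 visnu = vindomstreken(vis, setje, gegetenvissen, minafs)
--                 while(minafs < lengte + breedte and visvroeger is None and visnu is None):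
--                     minafs += 1
--                     visvroeger = vindomstreken(visje, setje, gegetenvissen, minafs)
--                     visnu = vindomstreken(vis, setje, gegetenvissen, minafs)
--                 if visnu is not None:
--                     visje = vis
--     return visje
--
-- def vindomstreken(plaats, set, gegetenvissen, min):
--     for vis in set:
--         if vis not in gegetenvissen and not vis == plaats:
--             if afstand(plaats, vis) <= min:
--                 return vis
--     return None
--
-- def afstand(tup1, tup2):
--     return abs(tup1[0] - tup2[0]) + abs(tup1[1] - tup2[1])
-- ===== SOURCE B (Python) =====
-- def vindbestevis(setje, garfield, gegetenvissen, lengte, breedte):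
--     alive = [v for v in setje if v not in gegetenvissen]
--     cap = max(lengte + breedte, 0)
--     best = None
--     for vis in alive:
--         d = abs(vis[0] - garfield[0]) + abs(vis[1] - garfield[1])
--         if best is None:
--             best = vis
--         else:
--             db = abs(best[0] - garfield[0]) + abs(best[1] - garfield[1])
--             if d < db:
--                 best = vis
--             elif d == db:
--                 dn = _nearest(vis, alive)
--                 if dn is not None and dn <= cap:
--                     dv = _nearest(best, alive)
--                     if dv is None or dn <= dv:
--                         best = vis
--     return best
--
-- def _nearest(p, alive):
--     # distance from p to its nearest other (distinct-valued) live fish, in one pass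
--     best = None
--     for q in alive:
--         if q != p:
--             d = abs(p[0] - q[0]) + abs(p[1] - q[1])
--             if best is None or d < best:
--                 best = d
--     return best
-- ===== Notes on version B (the rewrite author's own statement) =====
-- stated objective: faster
-- what changed: B filters the eaten fish once and, on each distance tie, compares the two candidates' nearest-live-neighbour distances computed directly in one pass each, instead of A's loop that grows a threshold from 0 to lengte+breedte and rescans the whole list at every threshold.
import Mathlib
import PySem

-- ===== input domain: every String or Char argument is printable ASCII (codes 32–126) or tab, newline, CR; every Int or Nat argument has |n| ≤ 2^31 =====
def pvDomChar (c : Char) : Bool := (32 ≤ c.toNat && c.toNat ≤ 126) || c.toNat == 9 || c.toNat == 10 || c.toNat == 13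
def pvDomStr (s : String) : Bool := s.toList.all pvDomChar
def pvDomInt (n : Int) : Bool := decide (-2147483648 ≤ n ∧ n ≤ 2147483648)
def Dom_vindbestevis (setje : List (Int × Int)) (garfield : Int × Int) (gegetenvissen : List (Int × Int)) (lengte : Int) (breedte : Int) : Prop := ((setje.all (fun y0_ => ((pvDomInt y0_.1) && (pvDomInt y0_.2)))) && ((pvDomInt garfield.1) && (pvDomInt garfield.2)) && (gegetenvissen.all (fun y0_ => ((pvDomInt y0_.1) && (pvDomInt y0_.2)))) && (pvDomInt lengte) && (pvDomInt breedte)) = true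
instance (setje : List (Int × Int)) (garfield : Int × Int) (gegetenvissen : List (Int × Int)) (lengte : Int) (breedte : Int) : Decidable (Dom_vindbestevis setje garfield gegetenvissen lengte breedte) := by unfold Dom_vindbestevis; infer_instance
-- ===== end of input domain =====

-- B replaces A's rescan-with-growing-threshold tie-break by a single nearest-neighbour-distance computation per tie (objective: faster).

-- ===== PORT A =====
def afstandA (tup1 tup2 : Int × Int) : Int := |tup1.1 - tup2.1| + |tup1.2 - tup2.2|

def vindomstreken (plaats : Int × Int) (s : List (Int × Int)) (geg : List (Int × Int)) (m : Int) : Option (Int × Int) :=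
  match s with
  | [] => none
  | vis :: rest =>
      if vis ∉ geg ∧ vis ≠ plaats then
        if afstandA plaats vis ≤ m then some vis else vindomstreken plaats rest geg m
      else vindomstreken plaats rest geg m

-- the while-loop of A's tie-break, state (minafs, visvroeger, visnu)
def tieLoop (setje geg : List (Int × Int)) (visje vis : Int × Int) (bound minafs : Int)
    (vv vn : Option (Int × Int)) : Option (Int × Int) :=
  if h : minafs < bound ∧ vv = none ∧ vn = none then
    tieLoop setje geg visje vis bound (minafs + 1)
      (vindomstreken visje setje geg (minafs + 1)) (vindomstreken vis setje geg (minafs + 1))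
  else vn
termination_by (bound - minafs).toNat
decreasing_by omega

-- one iteration of A's main loop; state = (min, visje)
def stepA (setje geg : List (Int × Int)) (garfield : Int × Int) (bound : Int)
    (st : Option Int × Option (Int × Int)) (vis : Int × Int) : Option Int × Option (Int × Int) :=
  if vis ∈ geg then st
  else
    let upd : Option Int × Option (Int × Int) :=
      match st.1 with
      | none => (some (afstandA vis garfield), some vis)
      | some m => if afstandA vis garfield < m then (some (afstandA vis garfield), some vis) else st
    match upd with
    | (some m, some visje) =>
        if afstandA vis garfield = m then
          let vv := vindomstreken visje setje geg 0
          let vn := vindomstreken vis setje geg 0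
          if tieLoop setje geg visje vis bound 0 vv vn ≠ none then (some m, some vis)
          else (some m, some visje)
        else (some m, some visje)
    | _ => upd  -- unreachable: in Python min and visje are both None or both set

def vindbestevis (setje : List (Int × Int)) (garfield : Int × Int) (gegetenvissen : List (Int × Int)) (lengte : Int) (breedte : Int) : Option (Int × Int) :=
  (setje.foldl (stepA setje gegetenvissen garfield (lengte + breedte)) (none, none)).2

-- ===== PORT B =====
def bafs (p q : Int × Int) : Int := |p.1 - q.1| + |p.2 - q.2|

-- _nearest's loop body
def nearestStep (p : Int × Int) (best : Option Int) (q : Int × Int) : Option Int :=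
  if q ≠ p then
    match best with
    | none => some (bafs p q)
    | some b => if bafs p q < b then some (bafs p q) else best
  else best

def nearest (p : Int × Int) (alive : List (Int × Int)) : Option Int :=
  alive.foldl (nearestStep p) none

def stepB (garfield : Int × Int) (alive : List (Int × Int)) (cap : Int)
    (best : Option (Int × Int)) (vis : Int × Int) : Option (Int × Int) :=
  let d := bafs vis garfield
  match best with
  | none => some vis
  | some b =>
      let db := bafs b garfield
      if d < db then some vis
      else if d = db then
        match nearest vis alive with
        | none => some b
        | some dn =>
            if dn ≤ cap then
              match nearest b alive with
              | none => some vis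
              | some dv => if dn ≤ dv then some vis else some b
            else some b
      else some b

def vindbestevis_alt (setje : List (Int × Int)) (garfield : Int × Int) (gegetenvissen : List (Int × Int)) (lengte : Int) (breedte : Int) : Option (Int × Int) :=
  let alive := setje.filter (fun v => decide (v ∉ gegetenvissen))
  let cap := max (lengte + breedte) 0
  alive.foldl (stepB garfield alive cap) none

-- ===== PRECONDITION & SPEC =====
def Spec_vindbestevis (setje : List (Int × Int)) (garfield : Int × Int) (gegetenvissen : List (Int × Int)) (lengte : Int) (breedte : Int) (out : Option (Int × Int)) : Prop := out = vindbestevis_alt setje garfield gegetenvissen lengte breedte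
instance (setje : List (Int × Int)) (garfield : Int × Int) (gegetenvissen : List (Int × Int)) (lengte : Int) (breedte : Int) (out : Option (Int × Int)) : Decidable (Spec_vindbestevis setje garfield gegetenvissen lengte breedte out) := by unfold Spec_vindbestevis; infer_instance

-- ===== CLAIM (what is proved, stated in full; the proofs are below) =====
def Claim_equal_vindbestevis : Prop := ∀ (setje : List (Int × Int)) (garfield : Int × Int) (gegetenvissen : List (Int × Int)) (lengte : Int) (breedte : Int), Dom_vindbestevis setje garfield gegetenvissen lengte breedte → Spec_vindbestevis setje garfield gegetenvissen lengte breedte (vindbestevis setje garfield gegetenvissen lengte breedte)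

-- ===== LEMMAS AND PROOFS =====

lemma bafs_eq_afstandA : bafs = afstandA := rfl

lemma bafs_nonneg (p q : Int × Int) : 0 ≤ bafs p q := by
  unfold bafs; positivity

-- value characterisation of B's _nearest fold
lemma nearest_fold_le_iff (p : Int × Int) (m : Int) :
    ∀ (l : List (Int × Int)) (acc : Option Int),
      (∃ d, l.foldl (nearestStep p) acc = some d ∧ d ≤ m) ↔
        ((∃ d, acc = some d ∧ d ≤ m) ∨ ∃ q ∈ l, q ≠ p ∧ bafs p q ≤ m) := by
  intro l
  induction l with
  | nil => simp
  | cons q l ih =>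
      intro acc
      rw [List.foldl_cons, ih]
      have hstep : (∃ d, nearestStep p acc q = some d ∧ d ≤ m) ↔
          ((∃ d, acc = some d ∧ d ≤ m) ∨ (q ≠ p ∧ bafs p q ≤ m)) := by
        unfold nearestStep
        by_cases hq : q = p
        · simp [hq]
        · simp only [ne_eq, hq, not_false_eq_true, true_and, if_pos]
          cases acc with
          | none => simp
          | some b =>
              by_cases hlt : bafs p q < b
              · simp only [if_pos hlt]
                constructor
                · rintro ⟨d, hd, hdm⟩; cases hd
                  right; omega
                · rintro (⟨d, hd, hdm⟩ | h)
                  · cases hd; exact ⟨bafs p q, rfl, by omega⟩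
                  · exact ⟨bafs p q, rfl, h⟩
              · simp only [if_neg hlt]
                constructor
                · rintro ⟨d, hd, hdm⟩; cases hd; left; exact ⟨_, rfl, hdm⟩
                · rintro (⟨d, hd, hdm⟩ | h)
                  · cases hd; exact ⟨_, rfl, hdm⟩
                  · exact ⟨b, rfl, by omega⟩
      rw [hstep]
      constructor
      · rintro (h | ⟨x, hx, hxp, hxm⟩)
        · rcases h with h | h
          · exact Or.inl h
          · exact Or.inr ⟨q, by simp, h⟩
        · exact Or.inr ⟨x, by simp [hx], hxp, hxm⟩
      · rintro (h | ⟨x, hx, hxp, hxm⟩)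
        · exact Or.inl (Or.inl h)
        · rcases List.mem_cons.mp hx with rfl | hx
          · exact Or.inl (Or.inr ⟨hxp, hxm⟩)
          · exact Or.inr ⟨x, hx, hxp, hxm⟩

lemma nearest_le_iff (p : Int × Int) (alive : List (Int × Int)) (m : Int) :
    (∃ d, nearest p alive = some d ∧ d ≤ m) ↔ ∃ q ∈ alive, q ≠ p ∧ bafs p q ≤ m := by
  unfold nearest
  rw [nearest_fold_le_iff]
  simp

lemma nearest_fold_nonneg (p : Int × Int) :
    ∀ (l : List (Int × Int)) (acc : Option Int), (∀ x, acc = some x → 0 ≤ x) →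
      ∀ d, l.foldl (nearestStep p) acc = some d → 0 ≤ d := by
  intro l
  induction l with
  | nil => intro acc hacc d hd; exact hacc d hd
  | cons q l ih =>
      intro acc hacc d hd
      rw [List.foldl_cons] at hd
      refine ih _ ?_ d hd
      intro x hx
      unfold nearestStep at hx
      by_cases hq : q = p
      · simp [hq] at hx; exact hacc x hx
      · simp only [if_pos hq] at hx
        cases acc with
        | none => simp at hx; subst hx; exact bafs_nonneg p q
        | some b =>
            by_cases hlt : bafs p q < b
            · simp [hlt] at hx; subst hx; exact bafs_nonneg p q
            · simp [hlt] at hx; subst hx; exact hacc b rfl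

lemma nearest_nonneg {p : Int × Int} {alive : List (Int × Int)} {d : Int}
    (h : nearest p alive = some d) : 0 ≤ d :=
  nearest_fold_nonneg p alive none (by simp) d h

lemma vindomstreken_none_iff (plaats : Int × Int) (geg : List (Int × Int)) (m : Int) :
    ∀ s : List (Int × Int),
      vindomstreken plaats s geg m = none ↔
        ∀ q ∈ s, q ∉ geg → q ≠ plaats → ¬ afstandA plaats q ≤ m := by
  intro s
  induction s with
  | nil => simp [vindomstreken]
  | cons vis rest ih =>
      unfold vindomstreken
      by_cases hc : vis ∉ geg ∧ vis ≠ plaats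
      · by_cases hd : afstandA plaats vis ≤ m
        · simp only [if_pos hc, if_pos hd]
          constructor
          · intro h; cases h
          · intro h; exact absurd hd (h vis (by simp) hc.1 hc.2)
        · simp only [if_pos hc, if_neg hd, ih]
          constructor
          · intro h q hq
            rcases List.mem_cons.mp hq with rfl | hq
            · intro _ _; exact hd
            · exact h q hq
          · intro h q hq; exact h q (List.mem_cons_of_mem _ hq)
      · simp only [if_neg hc, ih]
        constructor
        · intro h q hq
          rcases List.mem_cons.mp hq with rfl | hq
          · intro h1 h2; exact absurd ⟨h1, h2⟩ hc
          · exact h q hq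
        · intro h q hq; exact h q (List.mem_cons_of_mem _ hq)

-- bridge: A's vindomstreken finds nothing within m iff B's nearest distance exceeds m
lemma vindomstreken_none_iff_nearest (plaats : Int × Int) (setje geg : List (Int × Int)) (m : Int) :
    vindomstreken plaats setje geg m = none ↔
      ¬ ∃ d, nearest plaats (setje.filter (fun v => decide (v ∉ geg))) = some d ∧ d ≤ m := by
  rw [vindomstreken_none_iff, nearest_le_iff]
  constructor
  · rintro h ⟨q, hq, hqp, hqm⟩
    rw [List.mem_filter, decide_eq_true_eq] at hq
    exact h q hq.1 hq.2 hqp (by rwa [bafs_eq_afstandA] at hqm)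
  · intro h q hq hqg hqp hqm
    exact h ⟨q, List.mem_filter.mpr ⟨hq, by simpa⟩, hqp, by rwa [bafs_eq_afstandA]⟩

-- characterisation of A's threshold-growing while loop via B's nearest distances
lemma tieLoop_ne_none_iff (setje geg : List (Int × Int)) (visje vis : Int × Int) (bound : Int) :
    ∀ (n : ℕ) (t : Int), (bound - t).toNat ≤ n →
      (tieLoop setje geg visje vis bound t
          (vindomstreken visje setje geg t) (vindomstreken vis setje geg t) ≠ none ↔
        ∃ d, nearest vis (setje.filter (fun v => decide (v ∉ geg))) = some d ∧
          d ≤ max t bound ∧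
          ∀ d', nearest visje (setje.filter (fun v => decide (v ∉ geg))) = some d' → d ≤ max t d') := by
  intro n
  induction n with
  | zero =>
      intro t ht
      have hbt : bound ≤ t := by omega
      rw [tieLoop]
      have hng : ¬ (t < bound ∧ vindomstreken visje setje geg t = none ∧ vindomstreken vis setje geg t = none) := by
        intro h; omega
      rw [dif_neg hng]
      have hmax : max t bound = t := by omega
      rw [hmax]
      rw [Ne, vindomstreken_none_iff_nearest, not_not]
      constructor
      · rintro ⟨d, hd, hdm⟩
        exact ⟨d, hd, hdm, fun d' _ => le_trans hdm (le_max_left _ _)⟩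
      · rintro ⟨d, hd, hdm, _⟩; exact ⟨d, hd, hdm⟩
  | succ n ih =>
      intro t ht
      rw [tieLoop]
      by_cases hg : t < bound ∧ vindomstreken visje setje geg t = none ∧ vindomstreken vis setje geg t = none
      · rw [dif_pos hg]
        obtain ⟨htb, hvv, hvn⟩ := hg
        rw [ih (t + 1) (by omega)]
        rw [vindomstreken_none_iff_nearest] at hvv hvn
        have hmax : max (t + 1) bound = max t bound := by omega
        rw [hmax]
        constructor
        · rintro ⟨d, hd, hdm, hall⟩
          refine ⟨d, hd, hdm, fun d' hd' => ?_⟩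
          have hgt : ¬ d' ≤ t := fun hle => hvv ⟨d', hd', hle⟩
          have := hall d' hd'
          omega
        · rintro ⟨d, hd, hdm, hall⟩
          refine ⟨d, hd, hdm, fun d' hd' => ?_⟩
          have hgt : ¬ d' ≤ t := fun hle => hvv ⟨d', hd', hle⟩
          have := hall d' hd'
          omega
      · rw [dif_neg hg]
        by_cases hvn : vindomstreken vis setje geg t = none
        · rw [hvn]
          have hvn' := (vindomstreken_none_iff_nearest vis setje geg t).mp hvn
          simp only [ne_eq, not_true_eq_false, false_iff]
          rintro ⟨d, hd, hdm, hall⟩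
          have hdt : ¬ d ≤ t := fun hle => hvn' ⟨d, hd, hle⟩
          by_cases htb : t < bound
          · have hvv : vindomstreken visje setje geg t ≠ none := by tauto
            have hvv' : ∃ d', nearest visje (setje.filter (fun v => decide (v ∉ geg))) = some d' ∧ d' ≤ t :=
              not_not.mp (fun h => hvv ((vindomstreken_none_iff_nearest _ _ _ _).mpr h))
            obtain ⟨d', hd', hd't⟩ := hvv'
            have := hall d' hd'
            omega
          · have : max t bound = t := by omega
            omega
        · simp only [ne_eq, hvn, not_false_eq_true, true_iff]
          have hvn' : ∃ d, nearest vis (setje.filter (fun v => decide (v ∉ geg))) = some d ∧ d ≤ t :=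
            not_not.mp (fun h => hvn ((vindomstreken_none_iff_nearest _ _ _ _).mpr h))
          obtain ⟨d, hd, hdt⟩ := hvn'
          refine ⟨d, hd, le_trans hdt (le_max_left _ _), fun d' _ => le_trans hdt (le_max_left _ _)⟩

-- single-step agreement between A's and B's loop bodies
lemma step_rel (setje geg : List (Int × Int)) (garfield : Int × Int) (bound : Int)
    (vis : Int × Int) (b : Option (Int × Int)) :
    stepA setje geg garfield bound (Option.map (fun p => afstandA p garfield) b, b) vis =
      if vis ∈ geg then (Option.map (fun p => afstandA p garfield) b, b)
      else
        (Option.map (fun p => afstandA p garfield)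
            (stepB garfield (setje.filter (fun v => decide (v ∉ geg))) (max bound 0) b vis),
          stepB garfield (setje.filter (fun v => decide (v ∉ geg))) (max bound 0) b vis) := by
  by_cases hv : vis ∈ geg
  · simp [stepA, hv]
  · rw [if_neg hv]
    cases b with
    | none =>
        simp only [stepA, if_neg hv, Option.map_none, stepB]
        simp [ite_self]
    | some p =>
        set alive := setje.filter (fun v => decide (v ∉ geg)) with halive
        set D := afstandA vis garfield with hD
        set M := afstandA p garfield with hM
        by_cases hlt : D < M
        · simp only [stepA, if_neg hv, Option.map_some, stepB]
          rw [← hD, ← hM]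
          simp only [if_pos hlt]
          simp [ite_self, bafs_eq_afstandA, ← hD, ← hM, hlt]
        · by_cases heq : D = M
          · simp only [stepA, if_neg hv, Option.map_some]
            rw [← hD, ← hM]
            simp only [if_neg hlt, if_pos heq]
            have hloop := tieLoop_ne_none_iff setje geg p vis bound (bound - 0).toNat 0 (le_refl _)
            have hcond : (tieLoop setje geg p vis bound 0
                (vindomstreken p setje geg 0) (vindomstreken vis setje geg 0) ≠ none) ↔
                (∃ d, nearest vis alive = some d ∧ d ≤ max bound 0 ∧
                  ∀ d', nearest p alive = some d' → d ≤ d') := by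
              rw [hloop]
              constructor
              · rintro ⟨d, hd, hdm, hall⟩
                refine ⟨d, hd, by omega, fun d' hd' => ?_⟩
                have := hall d' hd'
                have := nearest_nonneg hd'
                omega
              · rintro ⟨d, hd, hdm, hall⟩
                refine ⟨d, hd, by omega, fun d' hd' => ?_⟩
                have := hall d' hd'
                have := nearest_nonneg hd'
                omega
            have hstepB : stepB garfield alive (max bound 0) (some p) vis =
                if (∃ d, nearest vis alive = some d ∧ d ≤ max bound 0 ∧
                    ∀ d', nearest p alive = some d' → d ≤ d') then some vis else some p := by
              simp only [stepB, bafs_eq_afstandA, ← hD, ← hM, if_neg hlt, if_pos heq]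
              cases hn : nearest vis alive with
              | none => simp
              | some dn =>
                  by_cases hcap : dn ≤ max bound 0
                  · cases hp : nearest p alive with
                    | none =>
                        simp only [if_pos hcap]
                        rw [if_pos ⟨dn, rfl, hcap, fun d' hd' => by simp at hd'⟩]
                    | some dv =>
                        by_cases hdv : dn ≤ dv
                        · simp only [if_pos hcap, if_pos hdv]
                          rw [if_pos ⟨dn, rfl, hcap, fun d' hd' => by
                            cases hd'; exact hdv⟩]
                        · simp only [if_pos hcap, if_neg hdv]
                          rw [if_neg]
                          rintro ⟨d, hd, _, hall⟩
                          cases hd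
                          exact hdv (hall dv rfl)
                  · simp only [if_neg hcap]
                    rw [if_neg]
                    rintro ⟨d, hd, hdm, _⟩
                    cases hd
                    exact hcap hdm
            rw [hstepB]
            by_cases hc : (∃ d, nearest vis alive = some d ∧ d ≤ max bound 0 ∧
                ∀ d', nearest p alive = some d' → d ≤ d')
            · rw [if_pos hc, if_pos (hcond.mpr hc)]
              simp [← hD, heq]
            · rw [if_neg hc, if_neg (fun h => hc (hcond.mp h))]
              simp [hM]
          · simp only [stepA, if_neg hv, Option.map_some, stepB]
            rw [← hD, ← hM]
            simp only [if_neg hlt, if_neg heq]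
            simp [bafs_eq_afstandA, ← hD, ← hM, hlt, heq]

-- fold agreement
lemma fold_rel (setje geg : List (Int × Int)) (garfield : Int × Int) (bound : Int) :
    ∀ (l : List (Int × Int)) (b : Option (Int × Int)),
      l.foldl (stepA setje geg garfield bound) (Option.map (fun p => afstandA p garfield) b, b) =
        (Option.map (fun p => afstandA p garfield)
            ((l.filter (fun v => decide (v ∉ geg))).foldl
              (stepB garfield (setje.filter (fun v => decide (v ∉ geg))) (max bound 0)) b),
          (l.filter (fun v => decide (v ∉ geg))).foldl
            (stepB garfield (setje.filter (fun v => decide (v ∉ geg))) (max bound 0)) b) := by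
  intro l
  induction l with
  | nil => simp
  | cons vis rest ih =>
      intro b
      rw [List.foldl_cons, step_rel]
      by_cases hv : vis ∈ geg
      · rw [if_pos hv, ih]
        have : (vis :: rest).filter (fun v => decide (v ∉ geg)) =
            rest.filter (fun v => decide (v ∉ geg)) := by
          rw [List.filter_cons]; simp [hv]
        rw [this]
      · rw [if_neg hv, ih]
        have : (vis :: rest).filter (fun v => decide (v ∉ geg)) =
            vis :: rest.filter (fun v => decide (v ∉ geg)) := by
          rw [List.filter_cons]; simp [hv]
        rw [this, List.foldl_cons]

-- ===== VERDICT (by name: the statement is the Claim_ definition above) =====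
theorem vindbestevis_spec : Claim_equal_vindbestevis := by
  intro setje garfield geg lengte breedte _
  unfold Spec_vindbestevis vindbestevis vindbestevis_alt
  have h := fold_rel setje geg garfield (lengte + breedte) setje none
  simp only [Option.map_none] at h
  rw [h]
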